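-- pv_equiv track=rewrite | github.com/punchagency/ment-be | ttscanner/utils/csv_utils.py | get_stable_key
-- ===== SOURCE A (Python) =====
-- def get_stable_key(row: dict) -> tuple:
--     """
--     Generate a stable key for a row by dynamically finding fields
--     containing 'sym' and 'int' in their names.
--     """
--     sym_value = None
--     int_value = None
--     for key, value in row.items():
--         if value is None:
--             continue
--         key_lower = key.lower()
--         if "sym" in key_lower:
--             sym_value = str(value).strip().lower()
--         if "int" in key_lower:
--             int_value = str(value).strip().lower()
--     return (sym_value, int_value)
-- ===== SOURCE B (Python) =====
-- def get_stable_key(row: dict) -> tuple: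
--     """
--     Generate a stable key for a row by dynamically finding fields
--     containing 'sym' and 'int' in their names.
--     """
--     items = list(row.items())[::-1]
--     sym_value = next((str(v).strip().lower()
--                       for k, v in items
--                       if v is not None and "sym" in k.lower()), None)
--     int_value = next((str(v).strip().lower()
--                       for k, v in items
--                       if v is not None and "int" in k.lower()), None)
--     return (sym_value, int_value)
-- ===== Notes on version B (the rewrite author's own statement) =====
-- stated objective: alternative
-- what changed: Replaces A's single accumulating forward loop (last match overwrites) with two independent first-match searches over the reversed item list via next() generators.
import Mathlib
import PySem

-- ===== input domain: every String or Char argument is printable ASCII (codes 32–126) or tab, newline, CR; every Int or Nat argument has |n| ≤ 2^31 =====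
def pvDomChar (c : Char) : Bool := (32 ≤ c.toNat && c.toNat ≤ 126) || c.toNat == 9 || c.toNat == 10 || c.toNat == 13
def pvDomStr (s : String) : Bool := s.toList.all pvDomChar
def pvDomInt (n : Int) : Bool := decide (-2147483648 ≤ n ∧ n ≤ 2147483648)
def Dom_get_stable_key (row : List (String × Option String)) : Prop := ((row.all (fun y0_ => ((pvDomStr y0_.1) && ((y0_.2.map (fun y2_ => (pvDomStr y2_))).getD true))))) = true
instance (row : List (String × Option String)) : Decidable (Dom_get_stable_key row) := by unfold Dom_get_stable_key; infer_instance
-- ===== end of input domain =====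

-- B replaces A's single accumulating forward loop with two independent
-- first-match searches over the reversed item list (alternative decomposition, same cost).


-- ===== PORT A =====
-- str(value).strip().lower() for a string value
def pvNorm (v : String) : String := PySem.Str.lower (PySem.Str.strip v)

def get_stable_key (row : List (String × Option String)) : Option String × Option String :=
  row.foldl
    (fun st kv =>
      match kv.2 with
      | none => st                                   -- if value is None: continue
      | some v =>
        let keyLower := PySem.Str.lower kv.1
        let st1 := if PySem.Str.isIn "sym" keyLower then (some (pvNorm v), st.2) else st
        if PySem.Str.isIn "int" keyLower then (st1.1, some (pvNorm v)) else st1)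
    (none, none)

-- ===== PORT B =====
-- next((… for k, v in items if v is not None and sub in k.lower()), None)
def pvFirstMatch (sub : String) (items : List (String × Option String)) : Option String :=
  items.findSome? (fun kv =>
    match kv.2 with
    | none => none
    | some v => if PySem.Str.isIn sub (PySem.Str.lower kv.1) then some (pvNorm v) else none)

def get_stable_key_alt (row : List (String × Option String)) : Option String × Option String :=
  let items := row.reverse        -- list(row.items())[::-1]
  (pvFirstMatch "sym" items, pvFirstMatch "int" items)

-- ===== PRECONDITION & SPEC =====
def Spec_get_stable_key (row : List (String × Option String)) (out : Option String × Option String) : Prop := out = get_stable_key_alt row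
instance (row : List (String × Option String)) (out : Option String × Option String) : Decidable (Spec_get_stable_key row out) := by unfold Spec_get_stable_key; infer_instance

-- ===== CLAIM (what is proved, stated in full; the proofs are below) =====
def Claim_equal_get_stable_key : Prop := ∀ (row : List (String × Option String)), Dom_get_stable_key row → Spec_get_stable_key row (get_stable_key row)

-- ===== LEMMAS AND PROOFS =====

theorem get_stable_key_concat (xs : List (String × Option String)) (x : String × Option String) :
    get_stable_key (xs ++ [x]) =
      (match x.2 with
       | none => get_stable_key xs
       | some v =>
         let keyLower := PySem.Str.lower x.1
         let st := get_stable_key xs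
         let st1 := if PySem.Str.isIn "sym" keyLower then (some (pvNorm v), st.2) else st
         if PySem.Str.isIn "int" keyLower then (st1.1, some (pvNorm v)) else st1) := by
  simp [get_stable_key, List.foldl_append]

theorem get_stable_key_eq_alt (row : List (String × Option String)) :
    get_stable_key row = get_stable_key_alt row := by
  induction row using List.reverseRecOn with
  | nil => rfl
  | append_singleton xs x ih =>
    rw [get_stable_key_concat]
    simp only [get_stable_key_alt, List.reverse_append, List.reverse_singleton,
      List.singleton_append, pvFirstMatch, List.findSome?_cons] at *
    rcases x with ⟨k, v⟩
    cases v with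
    | none => simpa using ih
    | some v =>
      by_cases hs : PySem.Chars.isIn ['s','y','m'] (PySem.Chars.lower k.toList) = true <;>
        by_cases hi : PySem.Chars.isIn ['i','n','t'] (PySem.Chars.lower k.toList) = true <;>
          simp [PySem.Str.isIn, hs, hi, ih]

-- ===== VERDICT (by name: the statement is the Claim_ definition above) =====
theorem get_stable_key_spec : Claim_equal_get_stable_key := by
  intro row _
  unfold Spec_get_stable_key
  exact get_stable_key_eq_alt row
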